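-- pv_equiv track=rewrite | github.com/ChanMeng666/juejin-algorithm-practice | juejin17.py | solution
-- ===== SOURCE A (Python) =====
-- def get_prime_factors_with_count(n: int) -> dict:
--     factors = {}
--     i = 2
--     while i * i <= n:
--         while n % i == 0:
--             factors[i] = factors.get(i, 0) + 1
--             n //= i
--         i += 1
--     if n > 1:
--         factors[n] = factors.get(n, 0) + 1
--     return factors
--
-- def solution(n: int, a: list) -> str:
--     # 获取所有数的素因子及其次数
--     numbers_factors = []
--     total_prime_counts = {}
--
--     for num in a:
--         if num == 1:
--             numbers_factors.append({})
--             continue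
--         factors = get_prime_factors_with_count(num)
--         numbers_factors.append(factors)
--
--         # 统计每个素数出现的总次数
--         for prime, count in factors.items():
--             total_prime_counts[prime] = total_prime_counts.get(prime, 0) + count
--
--     # 检查每个数的素因子情况
--     for i, factors in enumerate(numbers_factors):
--         if len(factors) <= 1:  # 如果数字已经只包含一种或没有素因子，跳过
--             continue
--
--         # 如果一个数有多个素因子，检查是否有其他数可以接收这些素因子
--         # 同时要确保其他数没有被占用
--         available_numbers = n - 1  # 除了当前数之外的数的数量
--         needed_receivers = len(factors) - 1  # 需要转移的素因子数量
--
--         # 如果需要的接收者数量大于可用的数的数量，返回 "No"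
--         if needed_receivers > available_numbers:
--             return "No"
--
--         # 检查其他数是否已经包含素因子
--         available_receivers = 0
--         for j, other_factors in enumerate(numbers_factors):
--             if i != j and len(other_factors) <= 1:
--                 available_receivers += 1
--
--         if available_receivers < needed_receivers:
--             return "No"
--
--     return "Yes"
-- ===== SOURCE B (Python) =====
-- def get_prime_factors_with_count(n: int) -> dict:
--     factors = {}
--     i = 2
--     while i * i <= n:
--         while n % i == 0:
--             factors[i] = factors.get(i, 0) + 1
--             n //= i
--         i += 1
--     if n > 1:
--         factors[n] = factors.get(n, 0) + 1
--     return factors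
--
-- def solution(n: int, a: list) -> str:
--     # One pass over a: keep only two scalars instead of the list of factor
--     # dicts and the nested per-number scan.
--     max_distinct = 0
--     simple_count = 0
--     for num in a:
--         c = len(get_prime_factors_with_count(num))
--         if c > max_distinct:
--             max_distinct = c
--         if c <= 1:
--             simple_count += 1
--     if max_distinct >= 2 and (max_distinct > n or simple_count < max_distinct - 1):
--         return "No"
--     return "Yes"
-- ===== Notes on version B (the rewrite author's own statement) =====
-- stated objective: faster
-- what changed: B drops A's per-number list of factor dicts and the nested availability rescan: one pass keeps only the maximum distinct-prime count and the count of numbers with at most one distinct prime, and a closed-form test on those two scalars decides the answer (the per-i condition is monotone in the distinct-prime count and the receiver count is i-independent).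
import Mathlib
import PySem

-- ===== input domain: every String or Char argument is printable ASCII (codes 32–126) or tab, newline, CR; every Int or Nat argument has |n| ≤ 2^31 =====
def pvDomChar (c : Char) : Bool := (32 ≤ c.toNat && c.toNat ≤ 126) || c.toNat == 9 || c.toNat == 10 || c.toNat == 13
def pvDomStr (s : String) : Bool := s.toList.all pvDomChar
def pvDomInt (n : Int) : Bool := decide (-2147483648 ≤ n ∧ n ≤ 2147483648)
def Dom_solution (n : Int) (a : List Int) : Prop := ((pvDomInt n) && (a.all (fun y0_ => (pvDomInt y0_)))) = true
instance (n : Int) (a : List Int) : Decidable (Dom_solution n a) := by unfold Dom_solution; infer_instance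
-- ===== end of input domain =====

-- B replaces A's list of factor dicts and nested per-number rescan with one pass keeping
-- two scalars (max distinct-prime count, count of numbers with ≤1 distinct prime); measured faster.

-- ===== PORT A =====
-- inner `while n % i == 0` of get_prime_factors_with_count; structural recursion on a
-- fuel counter that only makes the loop total (n.toNat steps always suffice: n shrinks
-- by a factor ≥ 2 each iteration, and for n ≤ 1 Python's loop body is never entered)
def gpfInner (fuel : Nat) (i n : Int) (factors : PySem.Dict Int Int) :
    Int × PySem.Dict Int Int :=
  match fuel with
  | 0 => (n, factors)
  | fuel + 1 =>
    if PySem.Int.mod n i = 0 then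
      gpfInner fuel i (PySem.Int.floordiv n i) (factors.insert i (factors.getD i 0 + 1))
    else (n, factors)

-- outer `while i * i <= n`; fuel again only makes it total (≤ √n + 1 ≤ n.toNat steps run)
def gpfOuter (fuel : Nat) (n i : Int) (factors : PySem.Dict Int Int) :
    Int × PySem.Dict Int Int :=
  match fuel with
  | 0 => (n, factors)
  | fuel + 1 =>
    if i * i ≤ n then
      let p := gpfInner n.toNat i n factors
      gpfOuter fuel p.1 (i + 1) p.2
    else (n, factors)

def get_prime_factors_with_count (n : Int) : PySem.Dict Int Int :=
  let p := gpfOuter n.toNat n 2 PySem.Dict.empty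
  if p.1 > 1 then p.2.insert p.1 (p.2.getD p.1 0 + 1) else p.2

-- second loop of A: `for i, factors in enumerate(numbers_factors)` with early return
def checkLoop (n : Int) (all : List (PySem.Dict Int Int)) :
    List (Int × PySem.Dict Int Int) → String
  | [] => "Yes"
  | (i, factors) :: rest =>
    if (factors.size : Int) ≤ 1 then checkLoop n all rest
    else
      let availableNumbers := n - 1
      let neededReceivers := (factors.size : Int) - 1
      if neededReceivers > availableNumbers then "No"
      else
        let availableReceivers := (PySem.List.enumerate all).foldl
          (fun acc p => if i ≠ p.1 ∧ (p.2.size : Int) ≤ 1 then acc + 1 else acc) 0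
        if availableReceivers < neededReceivers then "No" else checkLoop n all rest

def solution (n : Int) (a : List Int) : String :=
  let st := a.foldl
    (fun (st : List (PySem.Dict Int Int) × PySem.Dict Int Int) num =>
      if num = 1 then (st.1 ++ [PySem.Dict.empty], st.2)
      else
        let factors := get_prime_factors_with_count num
        let tpc := factors.items.foldl
          (fun t pc => t.insert pc.1 (t.getD pc.1 0 + pc.2)) st.2
        (st.1 ++ [factors], tpc))
    ([], PySem.Dict.empty)
  checkLoop n st.1 (PySem.List.enumerate st.1)

-- ===== PORT B =====
def solution_alt (n : Int) (a : List Int) : String :=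
  let st := a.foldl
    (fun (st : Int × Int) num =>
      let c : Int := (get_prime_factors_with_count num).size
      (if c > st.1 then c else st.1, if c ≤ 1 then st.2 + 1 else st.2))
    (0, 0)
  if 2 ≤ st.1 ∧ (st.1 > n ∨ st.2 < st.1 - 1) then "No" else "Yes"

-- ===== PRECONDITION & SPEC =====
def Spec_solution (n : Int) (a : List Int) (out : String) : Prop := out = solution_alt n a
instance (n : Int) (a : List Int) (out : String) : Decidable (Spec_solution n a out) := by unfold Spec_solution; infer_instance

-- ===== CLAIM (what is proved, stated in full; the proofs are below) =====
def Claim_equal_solution : Prop := ∀ (n : Int) (a : List Int), Dom_solution n a → Spec_solution n a (solution n a)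

-- ===== LEMMAS AND PROOFS =====

-- distinct-prime count of num, as both programs compute it for num ≠ 1
def pvC (num : Int) : Int := (get_prime_factors_with_count num).size

theorem gpf_one : get_prime_factors_with_count 1 = PySem.Dict.empty := by decide

-- A's first phase builds the map of factor dicts (the total counter is dead state)
theorem phaseA_eq_map (a : List Int) (acc : List (PySem.Dict Int Int)) (t : PySem.Dict Int Int) :
    (a.foldl
      (fun (st : List (PySem.Dict Int Int) × PySem.Dict Int Int) num =>
        if num = 1 then (st.1 ++ [PySem.Dict.empty], st.2)
        else
          let factors := get_prime_factors_with_count num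
          let tpc := factors.items.foldl
            (fun t pc => t.insert pc.1 (t.getD pc.1 0 + pc.2)) st.2
          (st.1 ++ [factors], tpc))
      (acc, t)).1 = acc ++ a.map get_prime_factors_with_count := by
  induction a generalizing acc t with
  | nil => simp
  | cons x xs ih =>
    by_cases hx : x = 1
    · simp [hx, List.foldl_cons, ih, gpf_one]
    · simp [hx, List.foldl_cons, ih]

-- the availability rescan counts all simple numbers when the current one is not simple
theorem avail_eq_simple (all : List (PySem.Dict Int Int)) (i : Int) (f : PySem.Dict Int Int)
    (hmem : (i, f) ∈ PySem.List.enumerate all) (hf : ¬ ((f.size : Int) ≤ 1)) :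
    (PySem.List.enumerate all).foldl
      (fun acc p => if i ≠ p.1 ∧ (p.2.size : Int) ≤ 1 then acc + 1 else acc) 0
    = (all.countP (fun d => (d.size : Int) ≤ 1) : Int) := by
  rw [PySem.List.foldl_ite_add_one (fun p : Int × PySem.Dict Int Int => i ≠ p.1 ∧ (p.2.size : Int) ≤ 1)]
  rw [zero_add, Nat.cast_inj]
  rw [List.countP_congr (q := fun p : Int × PySem.Dict Int Int => decide ((p.2.size : Int) ≤ 1)) ?_]
  · conv_rhs => rw [← PySem.List.map_snd_enumerate all 0, List.countP_map]
    rfl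
  · intro p hp
    by_cases hpi : i = p.1
    · obtain ⟨k, hk, hpk⟩ := (PySem.List.mem_enumerate_iff all 0 p).mp hp
      obtain ⟨k', hk', hik⟩ := (PySem.List.mem_enumerate_iff all 0 (i, f)).mp hmem
      have hkk : k = k' := by
        have h1 : p.1 = (k : Int) := by simp [hpk]
        have h2 : i = (k' : Int) := by
          have := congrArg Prod.fst hik; simpa using this
        omega
      subst hkk
      have hpf : p = (i, f) := by rw [hpk, hik]
      subst hpf
      have hbig : ¬ (((i, f).2.size : Int) ≤ 1) := by simpa using hf
      simp [hbig]
    · simp [hpi]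

-- checkLoop returns "No" iff some remaining number triggers A's per-number test
theorem checkLoop_char (n : Int) (all : List (PySem.Dict Int Int))
    (rest : List (Int × PySem.Dict Int Int))
    (hsub : ∀ q ∈ rest, q ∈ PySem.List.enumerate all) :
    checkLoop n all rest
    = if ∃ q ∈ rest, 2 ≤ (q.2.size : Int) ∧
        ((q.2.size : Int) - 1 > n - 1 ∨
          ((all.countP (fun d => (d.size : Int) ≤ 1) : Int) < (q.2.size : Int) - 1))
      then "No" else "Yes" := by
  induction rest with
  | nil => simp [checkLoop]
  | cons q rest ih =>
    obtain ⟨i, f⟩ := q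
    have hmem : (i, f) ∈ PySem.List.enumerate all := hsub (i, f) (List.mem_cons_self)
    have hsub' : ∀ q ∈ rest, q ∈ PySem.List.enumerate all :=
      fun q hq => hsub q (List.mem_cons_of_mem _ hq)
    rw [checkLoop]
    by_cases h1 : (f.size : Int) ≤ 1
    · rw [if_pos h1, ih hsub']
      have hq : ¬ (2 ≤ ((i, f).2.size : Int) ∧
          (((i, f).2.size : Int) - 1 > n - 1 ∨
            ((all.countP (fun d => (d.size : Int) ≤ 1) : Int) < ((i, f).2.size : Int) - 1))) := by
        intro hc
        have h2 := hc.1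
        change (2 : Int) ≤ (f.size : Int) at h2
        omega
      have hiff : (∃ q ∈ (i, f) :: rest, 2 ≤ (q.2.size : Int) ∧
            ((q.2.size : Int) - 1 > n - 1 ∨
              ((all.countP (fun d => (d.size : Int) ≤ 1) : Int) < (q.2.size : Int) - 1)))
          ↔ (∃ q ∈ rest, 2 ≤ (q.2.size : Int) ∧
            ((q.2.size : Int) - 1 > n - 1 ∨
              ((all.countP (fun d => (d.size : Int) ≤ 1) : Int) < (q.2.size : Int) - 1))) := by
        constructor
        · rintro ⟨q, hqm, hqP⟩
          rcases List.mem_cons.mp hqm with hq1 | hq2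
          · subst hq1; exact absurd hqP hq
          · exact ⟨q, hq2, hqP⟩
        · rintro ⟨q, hqm, hqP⟩
          exact ⟨q, List.mem_cons_of_mem _ hqm, hqP⟩
      rw [if_congr hiff rfl rfl]
    · rw [if_neg h1]
      rw [avail_eq_simple all i f hmem h1]
      by_cases h2 : (f.size : Int) - 1 > n - 1
      · rw [if_pos h2]
        have : ∃ q ∈ (i, f) :: rest, 2 ≤ (q.2.size : Int) ∧
            ((q.2.size : Int) - 1 > n - 1 ∨
              ((all.countP (fun d => (d.size : Int) ≤ 1) : Int) < (q.2.size : Int) - 1)) :=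
          ⟨(i, f), List.mem_cons_self, by change (2 : Int) ≤ (f.size : Int); omega, Or.inl h2⟩
        rw [if_pos this]
      · rw [if_neg h2]
        by_cases h3 : (all.countP (fun d => (d.size : Int) ≤ 1) : Int) < (f.size : Int) - 1
        · rw [if_pos h3]
          have : ∃ q ∈ (i, f) :: rest, 2 ≤ (q.2.size : Int) ∧
              ((q.2.size : Int) - 1 > n - 1 ∨
                ((all.countP (fun d => (d.size : Int) ≤ 1) : Int) < (q.2.size : Int) - 1)) :=
            ⟨(i, f), List.mem_cons_self, by change (2 : Int) ≤ (f.size : Int); omega, Or.inr h3⟩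
          rw [if_pos this]
        · rw [if_neg h3, ih hsub']
          have hq : ¬ (2 ≤ (((i, f).2.size : Int)) ∧
              (((i, f).2.size : Int) - 1 > n - 1 ∨
                ((all.countP (fun d => (d.size : Int) ≤ 1) : Int) < ((i, f).2.size : Int) - 1))) := by
            intro hc
            obtain ⟨hc1, hc2⟩ := hc
            change (2 : Int) ≤ (f.size : Int) at hc1
            change ((f.size : Int) - 1 > n - 1 ∨
              ((all.countP (fun d => (d.size : Int) ≤ 1) : Int) < (f.size : Int) - 1)) at hc2
            omega
          have hiff : (∃ q ∈ (i, f) :: rest, 2 ≤ (q.2.size : Int) ∧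
                ((q.2.size : Int) - 1 > n - 1 ∨
                  ((all.countP (fun d => (d.size : Int) ≤ 1) : Int) < (q.2.size : Int) - 1)))
              ↔ (∃ q ∈ rest, 2 ≤ (q.2.size : Int) ∧
                ((q.2.size : Int) - 1 > n - 1 ∨
                  ((all.countP (fun d => (d.size : Int) ≤ 1) : Int) < (q.2.size : Int) - 1))) := by
            constructor
            · rintro ⟨q, hqm, hqP⟩
              rcases List.mem_cons.mp hqm with hq1 | hq2
              · subst hq1; exact absurd hqP hq
              · exact ⟨q, hq2, hqP⟩
            · rintro ⟨q, hqm, hqP⟩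
              exact ⟨q, List.mem_cons_of_mem _ hqm, hqP⟩
          rw [if_congr hiff rfl rfl]

-- B's fold computes the running max of pvC and the count of simple numbers
theorem phaseB_eq (a : List Int) (m s : Int) :
    (a.foldl
      (fun (st : Int × Int) num =>
        let c : Int := (get_prime_factors_with_count num).size
        (if c > st.1 then c else st.1, if c ≤ 1 then st.2 + 1 else st.2))
      (m, s))
    = (a.foldl (fun acc y => max acc (pvC y)) m,
       s + (a.countP (fun x => pvC x ≤ 1) : Int)) := by
  induction a generalizing m s with
  | nil => simp
  | cons x xs ih =>
    simp only [List.foldl_cons, List.countP_cons, ih]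
    have h1 : (if ((get_prime_factors_with_count x).size : Int) > m
        then ((get_prime_factors_with_count x).size : Int) else m) = max m (pvC x) := by
      unfold pvC; rw [max_def]; split_ifs <;> omega
    rw [h1]
    refine Prod.ext rfl ?_
    simp only [pvC]
    by_cases hc : ((get_prime_factors_with_count x).size : Int) ≤ 1
    · simp only [hc, decide_true, if_true]
      push_cast
      omega
    · simp only [hc, decide_false, if_false]
      push_cast
      omega

theorem exists_enumerate_snd {α : Type} (xs : List α) (P : α → Prop) :
    (∃ q ∈ PySem.List.enumerate xs, P q.2) ↔ ∃ x ∈ xs, P x := by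
  constructor
  · rintro ⟨q, hq, hP⟩
    obtain ⟨k, hk, rfl⟩ := (PySem.List.mem_enumerate_iff xs 0 q).mp hq
    exact ⟨xs[k], xs.getElem_mem hk, hP⟩
  · rintro ⟨x, hx, hP⟩
    obtain ⟨k, hk, rfl⟩ := List.mem_iff_getElem.mp hx
    exact ⟨((0 : Int) + k, xs[k]), (PySem.List.mem_enumerate_iff xs 0 _).mpr ⟨k, hk, rfl⟩, hP⟩

theorem cond_iff (n S : Int) (a : List Int) :
    (∃ x ∈ a.map get_prime_factors_with_count, 2 ≤ (x.size : Int) ∧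
        ((x.size : Int) - 1 > n - 1 ∨ S < (x.size : Int) - 1))
    ↔ (2 ≤ a.foldl (fun acc y => max acc (pvC y)) 0 ∧
        (a.foldl (fun acc y => max acc (pvC y)) 0 > n ∨
          S < a.foldl (fun acc y => max acc (pvC y)) 0 - 1)) := by
  have hmax := PySem.List.le_foldl_max_int a pvC 0
  constructor
  · rintro ⟨x, hx, h2, hd⟩
    obtain ⟨y, hy, rfl⟩ := List.mem_map.mp hx
    have hle := hmax.2 y hy
    have hpc : ((get_prime_factors_with_count y).size : Int) = pvC y := rfl
    rw [hpc] at h2 hd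
    exact ⟨by omega, by rcases hd with hd | hd; exact Or.inl (by omega); exact Or.inr (by omega)⟩
  · rintro ⟨h2, hd⟩
    have hmem : a.foldl (fun acc y => max acc (pvC y)) 0 = 0 ∨
        a.foldl (fun acc y => max acc (pvC y)) 0 ∈ a.map pvC := by
      rw [← List.foldl_map]
      exact PySem.List.foldl_max_mem (a.map pvC) 0
    rcases hmem with h0 | hm
    · omega
    · obtain ⟨y, hy, hM⟩ := List.mem_map.mp hm
      refine ⟨get_prime_factors_with_count y, List.mem_map.mpr ⟨y, hy, rfl⟩, ?_, ?_⟩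
      · show (2 : Int) ≤ (pvC y : Int); omega
      · show ((pvC y) - 1 > n - 1 ∨ S < (pvC y) - 1); omega

-- ===== VERDICT (by name: the statement is the Claim_ definition above) =====
theorem solution_spec : Claim_equal_solution := by
  intro n a _
  unfold Spec_solution
  simp only [solution, solution_alt]
  rw [phaseA_eq_map a [] PySem.Dict.empty, List.nil_append]
  rw [phaseB_eq a 0 0]
  rw [checkLoop_char n (a.map get_prime_factors_with_count) _ (fun q hq => hq)]
  have hS : (((a.map get_prime_factors_with_count).countP
      (fun d => decide ((d.size : Int) ≤ 1))) : Int)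
      = ((a.countP (fun x => decide (pvC x ≤ 1))) : Int) := by
    rw [List.countP_map]; rfl
  refine if_congr ?_ rfl rfl
  refine Iff.trans (exists_enumerate_snd (a.map get_prime_factors_with_count)
    (fun x => 2 ≤ (x.size : Int) ∧ ((x.size : Int) - 1 > n - 1 ∨
      ((List.countP (fun d => decide ((d.size : Int) ≤ 1))
        (List.map get_prime_factors_with_count a) : Int) < (x.size : Int) - 1)))) ?_
  dsimp only
  rw [hS, zero_add]
  exact cond_iff n _ a
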